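-- pv_equiv track=rewrite | github.com/zhangyl4/EyeWO | data/utils.py | split_indices_by_video
-- ===== SOURCE A (Python) =====
-- def split_indices_by_video(load_range, frame_lengths):
--     ranges = []
--     cumulative_frame_count = 0
--
--     for i, frame_len in enumerate(frame_lengths):
--         video_start = cumulative_frame_count
--         video_end = cumulative_frame_count + frame_len
--         video_indices = [idx for idx in load_range if video_start <= idx < video_end]
--         if video_indices:
--             local_indices = [idx - video_start for idx in video_indices]
--             ranges.append((i, local_indices))
--         cumulative_frame_count += frame_len
--     return ranges
-- ===== SOURCE B (Python) =====
-- def _bisect_left(a, x):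
--     lo, hi = 0, len(a)
--     while lo < hi:
--         mid = (lo + hi) // 2
--         if a[mid] < x:
--             lo = mid + 1
--         else:
--             hi = mid
--     return lo
--
--
-- def split_indices_by_video(load_range, frame_lengths):
--     # Index load_range once: (value, original position) pairs sorted by value.
--     pairs = sorted(((v, p) for p, v in enumerate(load_range)), key=lambda vp: vp[0])
--     vals = [v for v, _ in pairs]
--     ranges = []
--     start = 0
--     for i, frame_len in enumerate(frame_lengths):
--         end = start + frame_len
--         lo = _bisect_left(vals, start)
--         hi = _bisect_left(vals, end)
--         if lo < hi:
--             sel = sorted(pairs[lo:hi], key=lambda vp: vp[1])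
--             ranges.append((i, [v - start for v, _ in sel]))
--         start = end
--     return ranges
-- ===== Notes on version B (the rewrite author's own statement) =====
-- stated objective: faster
-- what changed: Instead of rescanning all of load_range for every video, B sorts load_range once with its original positions, finds each video's value range by two hand-written binary searches over the prefix-sum boundaries, and restores the original order of the slice by re-sorting on position.
import Mathlib
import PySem

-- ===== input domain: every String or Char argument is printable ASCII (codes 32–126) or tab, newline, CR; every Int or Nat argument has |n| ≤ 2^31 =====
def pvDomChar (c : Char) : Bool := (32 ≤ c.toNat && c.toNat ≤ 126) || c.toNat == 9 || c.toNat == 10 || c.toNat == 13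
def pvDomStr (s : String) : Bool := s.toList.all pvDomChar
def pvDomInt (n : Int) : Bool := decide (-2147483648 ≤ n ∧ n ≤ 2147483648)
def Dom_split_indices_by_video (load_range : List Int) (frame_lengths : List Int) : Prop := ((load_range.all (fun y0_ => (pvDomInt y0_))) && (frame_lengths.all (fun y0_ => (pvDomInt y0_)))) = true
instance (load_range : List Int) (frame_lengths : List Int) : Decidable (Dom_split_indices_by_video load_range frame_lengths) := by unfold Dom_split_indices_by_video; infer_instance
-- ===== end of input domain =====

-- B replaces A's per-video rescan of load_range with one sort of load_range and two binary
-- searches per video over the sorted values (alternative algorithm; measured faster on large inputs).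


-- ===== PORT A =====
-- literal transliteration of A: for each video, scan all of load_range
def split_indices_by_video (load_range : List Int) (frame_lengths : List Int) : List (Int × List Int) :=
  ((PySem.List.enumerate frame_lengths).foldl (fun st ifl =>
      let video_start := st.2
      let video_end := video_start + ifl.2
      let video_indices := load_range.filter (fun idx => decide (video_start ≤ idx) && decide (idx < video_end))
      (if video_indices ≠ [] then st.1 ++ [(ifl.1, video_indices.map (fun idx => idx - video_start))] else st.1,
       video_start + ifl.2)) ([], 0)).1

-- ===== PORT B =====
-- hand-written _bisect_left of Source B (lo, hi stay nonnegative, so Python's '//' is Nat division;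
-- a[mid] is always in range on every call made here since mid < hi ≤ len a, so getD is exact)
def pvBisect (a : List Int) (x : Int) (lo hi : Nat) : Nat :=
  if _h : lo < hi then
    let mid := (lo + hi) / 2
    if a.getD mid 0 < x then pvBisect a x (mid + 1) hi else pvBisect a x lo mid
  else lo
termination_by hi - lo
decreasing_by all_goals omega

def split_indices_by_video_alt (load_range : List Int) (frame_lengths : List Int) : List (Int × List Int) :=
  let pairs := PySem.List.sorted ((PySem.List.enumerate load_range).map (fun pv => (pv.2, pv.1))) (fun vp => vp.1)
  let vals := pairs.map (fun vp => vp.1)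
  ((PySem.List.enumerate frame_lengths).foldl (fun st ifl =>
      let start := st.2
      let e := start + ifl.2
      let lo := pvBisect vals start 0 vals.length
      let hi := pvBisect vals e 0 vals.length
      (if lo < hi then
         let sel := PySem.List.sorted (PySem.List.slice pairs (some (lo : Int)) (some (hi : Int))) (fun vp => vp.2)
         st.1 ++ [(ifl.1, sel.map (fun vp => vp.1 - start))]
       else st.1, e)) ([], 0)).1

-- ===== PRECONDITION & SPEC =====
def Spec_split_indices_by_video (load_range : List Int) (frame_lengths : List Int) (out : List (Int × List Int)) : Prop := out = split_indices_by_video_alt load_range frame_lengths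
instance (load_range : List Int) (frame_lengths : List Int) (out : List (Int × List Int)) : Decidable (Spec_split_indices_by_video load_range frame_lengths out) := by unfold Spec_split_indices_by_video; infer_instance

-- ===== CLAIM (what is proved, stated in full; the proofs are below) =====
def Claim_equal_split_indices_by_video : Prop := ∀ (load_range : List Int) (frame_lengths : List Int), Dom_split_indices_by_video load_range frame_lengths → Spec_split_indices_by_video load_range frame_lengths (split_indices_by_video load_range frame_lengths)

-- ===== LEMMAS AND PROOFS =====

-- pvBisect on a sorted segment keeps the separation invariant: everything strictly below the
-- result is < x, everything from the result on is ≥ x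
lemma pvBisect_invariant (a : List Int) (x : Int) (hs : a.Pairwise (· ≤ ·)) :
    ∀ (n lo hi : Nat), hi - lo ≤ n → lo ≤ hi → hi ≤ a.length →
      (∀ j (hj : j < a.length), j < lo → a[j] < x) →
      (∀ j (hj : j < a.length), hi ≤ j → x ≤ a[j]) →
      pvBisect a x lo hi ≤ a.length ∧
      (∀ j (hj : j < a.length), j < pvBisect a x lo hi → a[j] < x) ∧
      (∀ j (hj : j < a.length), pvBisect a x lo hi ≤ j → x ≤ a[j]) := by
  intro n
  induction n with
  | zero =>
    intro lo hi hn hlh hlen h1 h2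
    have : lo = hi := by omega
    subst this
    rw [pvBisect]
    simp only [lt_irrefl, dif_neg, not_false_iff]
    exact ⟨by omega, h1, h2⟩
  | succ n ih =>
    intro lo hi hn hlh hlen h1 h2
    rw [pvBisect]
    by_cases h : lo < hi
    · simp only [h, dif_pos]
      have hmid1 : lo ≤ (lo + hi) / 2 := by omega
      have hmid2 : (lo + hi) / 2 < hi := by omega
      have hmlen : (lo + hi) / 2 < a.length := by omega
      have hgetD : a.getD ((lo + hi) / 2) 0 = a[(lo + hi) / 2] := List.getD_eq_getElem a 0 hmlen
      have hpw := List.pairwise_iff_getElem.mp hs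
      by_cases hc : a.getD ((lo + hi) / 2) 0 < x
      · simp only [hc, if_pos]
        refine ih ((lo + hi) / 2 + 1) hi (by omega) (by omega) hlen ?_ h2
        intro j hj hjlt
        rcases Nat.lt_or_ge j lo with hjl | hjl
        · exact h1 j hj hjl
        · have : a[j] ≤ a[(lo + hi) / 2] := by
            rcases Nat.lt_or_ge j ((lo + hi) / 2) with hlt | hge
            · exact hpw j ((lo + hi) / 2) hj hmlen hlt
            · have : j = (lo + hi) / 2 := by omega
              subst this; exact le_refl _
          rw [hgetD] at hc; omega
      · simp only [hc, if_neg, not_false_iff]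
        refine ih lo ((lo + hi) / 2) (by omega) (by omega) (by omega) h1 ?_
        intro j hj hjge
        rw [hgetD] at hc
        have hc' := not_lt.mp hc
        rcases Nat.lt_or_ge ((lo + hi) / 2) j with hlt | hge
        · exact hc'.trans (hpw ((lo + hi) / 2) j hmlen hj hlt)
        · have : j = (lo + hi) / 2 := by omega
          subst this; exact hc'
    · simp only [h, dif_neg, not_false_iff]
      have : lo = hi := by omega
      subst this
      exact ⟨by omega, h1, h2⟩

lemma pvBisect_spec (a : List Int) (x : Int) (hs : a.Pairwise (· ≤ ·)) :
    pvBisect a x 0 a.length ≤ a.length ∧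
    (∀ j (hj : j < a.length), j < pvBisect a x 0 a.length → a[j] < x) ∧
    (∀ j (hj : j < a.length), pvBisect a x 0 a.length ≤ j → x ≤ a[j]) :=
  pvBisect_invariant a x hs a.length 0 a.length (by omega) (Nat.zero_le _) le_rfl
    (by intro j hj h; omega) (by intro j hj h; omega)

-- a positional split of a list is its two filters
lemma take_drop_eq_filter {α : Type} (l : List α) (p : α → Bool) :
    ∀ (r : Nat), r ≤ l.length →
    (∀ j (hj : j < l.length), j < r → p l[j] = true) →
    (∀ j (hj : j < l.length), r ≤ j → p l[j] = false) →
    l.take r = l.filter p ∧ l.drop r = l.filter (fun z => !p z) := by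
  induction l with
  | nil => intro r hr _ _; simp_all
  | cons a t ih =>
    intro r hr h1 h2
    cases r with
    | zero =>
      have hall : ∀ z ∈ a :: t, p z = false := by
        intro z hz
        obtain ⟨j, hj, rfl⟩ := List.mem_iff_getElem.mp hz
        exact h2 j hj (Nat.zero_le _)
      constructor
      · simp only [List.take_zero]
        symm
        rw [List.filter_eq_nil_iff]
        intro z hz; simp [hall z hz]
      · simp only [List.drop_zero]
        symm
        rw [List.filter_eq_self]
        intro z hz; simp [hall z hz]
    | succ r' =>
      have hpa : p a = true := h1 0 (by simp) (Nat.succ_pos _)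
      have ht := ih r' (by simpa using hr)
        (fun j hj hjr => by simpa using h1 (j + 1) (by simpa using hj) (by omega))
        (fun j hj hjr => by simpa using h2 (j + 1) (by simpa using hj) (by omega))
      constructor
      · simp [List.take_succ_cons, hpa, ht.1]
      · simp [List.drop_succ_cons, hpa, ht.2]

-- enumerate: filtering on the value and projecting the value forgets the indices
lemma enum_filter_snd_map (p : Int → Bool) (f : Int → Int) :
    ∀ (l : List Int) (s0 : Int),
      ((PySem.List.enumerate l s0).filter (fun q => p q.2)).map (fun q => f q.2)
        = (l.filter p).map f := by
  intro l
  induction l with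
  | nil => intro s0; simp [PySem.List.enumerate]
  | cons a t ih =>
    intro s0
    rw [PySem.List.enumerate_cons]
    by_cases hp : p a <;> simp [hp, ih (s0 + 1)]

-- the per-video core: what B's bisect + slice + position re-sort computes for the
-- boundaries s, e is exactly what A's scan of load_range computes
lemma core_video (lr : List Int) (s e : Int) :
    ((pvBisect (((PySem.List.sorted ((PySem.List.enumerate lr).map (fun pv => (pv.2, pv.1))) (fun vp => vp.1)).map (fun vp => vp.1))) s 0 ((PySem.List.sorted ((PySem.List.enumerate lr).map (fun pv => (pv.2, pv.1))) (fun vp => vp.1)).map (fun vp => vp.1)).length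
        < pvBisect (((PySem.List.sorted ((PySem.List.enumerate lr).map (fun pv => (pv.2, pv.1))) (fun vp => vp.1)).map (fun vp => vp.1))) e 0 ((PySem.List.sorted ((PySem.List.enumerate lr).map (fun pv => (pv.2, pv.1))) (fun vp => vp.1)).map (fun vp => vp.1)).length)
      ↔ lr.filter (fun v => decide (s ≤ v) && decide (v < e)) ≠ []) ∧
    (PySem.List.sorted
        (PySem.List.slice (PySem.List.sorted ((PySem.List.enumerate lr).map (fun pv => (pv.2, pv.1))) (fun vp => vp.1))
          (some ((pvBisect (((PySem.List.sorted ((PySem.List.enumerate lr).map (fun pv => (pv.2, pv.1))) (fun vp => vp.1)).map (fun vp => vp.1))) s 0 ((PySem.List.sorted ((PySem.List.enumerate lr).map (fun pv => (pv.2, pv.1))) (fun vp => vp.1)).map (fun vp => vp.1)).length : Nat) : Int))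
          (some ((pvBisect (((PySem.List.sorted ((PySem.List.enumerate lr).map (fun pv => (pv.2, pv.1))) (fun vp => vp.1)).map (fun vp => vp.1))) e 0 ((PySem.List.sorted ((PySem.List.enumerate lr).map (fun pv => (pv.2, pv.1))) (fun vp => vp.1)).map (fun vp => vp.1)).length : Nat) : Int)))
        (fun vp => vp.2)).map (fun vp => vp.1 - s)
      = (lr.filter (fun v => decide (s ≤ v) && decide (v < e))).map (fun v => v - s) := by
  set base := (PySem.List.enumerate lr).map (fun pv : Int × Int => (pv.2, pv.1)) with hbase
  set pairs := PySem.List.sorted base (fun vp => vp.1) with hpairs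
  set vals := pairs.map (fun vp => vp.1) with hvals
  set pb : Int → Bool := fun v => decide (s ≤ v) && decide (v < e) with hpb
  set lo := pvBisect vals s 0 vals.length with hlo
  set hi := pvBisect vals e 0 vals.length with hhi
  have hp : pairs.Pairwise (fun a b => a.1 ≤ b.1) := PySem.List.sorted_pairwise base _
  have hvpw : vals.Pairwise (· ≤ ·) := List.pairwise_map.mpr hp
  have hlenv : vals.length = pairs.length := List.length_map ..
  have hgv : ∀ j (hj : j < pairs.length), vals[j]'(by omega) = pairs[j].1 := by
    intro j hj; simp [hvals]
  obtain ⟨hsle, hslt, hsge⟩ := pvBisect_spec vals s hvpw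
  obtain ⟨hele, helt, hege⟩ := pvBisect_spec vals e hvpw
  rw [← hlo] at hsle hslt hsge
  rw [← hhi] at hele helt hege
  -- the sorted big list, filtered, equals the filtered enumerate re-sorted by position
  have hperm : (((PySem.List.enumerate lr).filter (fun q => pb q.2)).map (fun q : Int × Int => (q.2, q.1))).Perm
      (pairs.filter (fun z => pb z.1)) := by
    have h1 : pairs.Perm base := PySem.List.sorted_perm base _ false
    have h2 := h1.filter (fun z : Int × Int => pb z.1)
    have h3 : base.filter (fun z : Int × Int => pb z.1)
        = ((PySem.List.enumerate lr).filter (fun q => pb q.2)).map (fun q : Int × Int => (q.2, q.1)) := by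
      rw [hbase, List.filter_map]; rfl
    rw [h3] at h2
    exact h2.symm
  have hpwys : (((PySem.List.enumerate lr).filter (fun q => pb q.2)).map (fun q : Int × Int => (q.2, q.1))).Pairwise
      (fun a b => a.2 < b.2) := by
    apply List.pairwise_map.mpr
    exact (PySem.List.pairwise_lt_enumerate lr 0).filter _
  have hsorted : PySem.List.sorted (pairs.filter (fun z => pb z.1)) (fun vp => vp.2)
      = ((PySem.List.enumerate lr).filter (fun q => pb q.2)).map (fun q : Int × Int => (q.2, q.1)) :=
    PySem.List.sorted_eq_of_perm_of_pairwise_lt _ _ _ hperm hpwys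
  -- the filter of pairs and A's filter of load_range have the same length
  have hlenfilter : (pairs.filter (fun z => pb z.1)).length = (lr.filter pb).length := by
    rw [← hperm.length_eq, List.length_map]
    have := congrArg List.length (enum_filter_snd_map pb (fun v => v - s) lr 0)
    simpa using this
  by_cases hlh : lo < hi
  · -- slice pairs[lo:hi] is the combined interval filter of pairs
    have hhile : hi ≤ pairs.length := by omega
    have htake : pairs.take hi = pairs.filter (fun z => decide (z.1 < e)) := by
      refine (take_drop_eq_filter pairs _ hi hhile ?_ ?_).1
      · intro j hj hjlt
        have := helt j (by omega) hjlt
        rw [hgv j hj] at this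
        simpa using this
      · intro j hj hge
        have := hege j (by omega) hge
        rw [hgv j hj] at this
        simpa using not_lt.mpr this
    have hFlen : (pairs.take hi).length = hi := by simp [List.length_take]; omega
    have hdrop : (pairs.take hi).drop lo = (pairs.take hi).filter (fun z => !decide (z.1 < s)) := by
      refine (take_drop_eq_filter (pairs.take hi) _ lo (by omega) ?_ ?_).2
      · intro j hj hjlt
        rw [List.getElem_take]
        have := hslt j (by rw [hFlen] at hj; omega) hjlt
        rw [hgv j (by rw [hFlen] at hj; omega)] at this
        simpa using this
      · intro j hj hge
        rw [List.getElem_take]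
        have := hsge j (by rw [hFlen] at hj; omega) hge
        rw [hgv j (by rw [hFlen] at hj; omega)] at this
        simpa using not_lt.mpr this
    have hslice : PySem.List.slice pairs (some (lo : Int)) (some (hi : Int))
        = pairs.filter (fun z => pb z.1) := by
      rw [PySem.List.slice_natCast, List.take_drop]
      have : lo + (hi - lo) = hi := by omega
      rw [this, hdrop, htake, List.filter_filter]
      apply List.filter_congr
      intro z _
      by_cases h1 : s ≤ z.1 <;> by_cases h2 : z.1 < e <;> simp [hpb, h1, h2] <;> omega
    constructor
    · have hne : (pairs.filter (fun z => pb z.1)) ≠ [] := by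
        rw [← hslice, PySem.List.slice_natCast, List.take_drop]
        have h1 : lo + (hi - lo) = hi := by omega
        rw [h1]
        intro hnil
        have := List.drop_eq_nil_iff.mp hnil
        rw [hFlen] at this
        omega
      constructor
      · intro _ hnil
        apply hne
        have : (lr.filter pb).length = 0 := by rw [hnil]; rfl
        have h0 : (pairs.filter (fun z => pb z.1)).length = 0 := by omega
        exact List.eq_nil_of_length_eq_zero h0
      · intro _; exact hlh
    · rw [hslice, hsorted, List.map_map]
      exact enum_filter_snd_map pb (fun v => v - s) lr 0
  · -- no element of load_range falls in [s, e): both sides are empty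
    have hfilnil : pairs.filter (fun z => pb z.1) = [] := by
      rw [List.filter_eq_nil_iff]
      intro z hz
      obtain ⟨j, hj, rfl⟩ := List.mem_iff_getElem.mp hz
      by_cases hjlo : j < lo
      · have := hslt j (by omega) hjlo
        rw [hgv j hj] at this
        simp [hpb]; omega
      · have := hege j (by omega) (by omega)
        rw [hgv j hj] at this
        simp [hpb]; omega
    have hanil : lr.filter pb = [] := by
      have : (lr.filter pb).length = 0 := by rw [← hlenfilter, hfilnil]; rfl
      exact List.eq_nil_of_length_eq_zero this
    constructor
    · constructor
      · intro h; exact absurd h hlh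
      · intro h; exact absurd hanil h
    · have hlsl : (PySem.List.slice pairs (some (lo : Int)) (some (hi : Int))) = [] := by
        rw [PySem.List.slice_natCast]
        have : hi - lo = 0 := by omega
        simp [this]
      rw [hlsl, hanil]
      rfl

-- ===== VERDICT (by name: the statement is the Claim_ definition above) =====
theorem split_indices_by_video_spec : Claim_equal_split_indices_by_video := by
  intro lr fl _
  unfold Spec_split_indices_by_video split_indices_by_video split_indices_by_video_alt
  refine congrArg Prod.fst ?_
  apply PySem.List.foldl_congr_mem
  intro acc ifl _
  simp only []
  have hc := core_video lr acc.2 (acc.2 + ifl.2)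
  refine Prod.ext ?_ rfl
  by_cases h : lr.filter (fun v => decide (acc.2 ≤ v) && decide (v < acc.2 + ifl.2)) = []
  · rw [if_neg (by simpa using h), if_neg (by rw [hc.1]; simpa using h)]
  · rw [if_pos h, if_pos (hc.1.mpr h)]
    rw [hc.2]
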